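-- pv_equiv track=rewrite | github.com/pego91/pruned-edit-distance | Trees/Utils_OPT.py | make_order
-- ===== SOURCE A (Python) =====
-- def make_order(lista,data_paz):
--     """
--     prende una lista e la mette in cordine con le etichette in data_paz
--     """
--     U=[]
--     N=[]
--     L=[]
--
--     for patient,obj in enumerate(lista):
--         if data_paz["type"][patient]=='L':
--             L.append(obj)
--         elif data_paz["type"][patient]=='U':
--             U.append(obj)
--         else:
--             N.append(obj)
--
--     return L+N+U
-- ===== SOURCE B (Python) =====
-- def make_order(lista, data_paz):
--     """
--     prende una lista e la mette in cordine con le etichette in data_paz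
--     """
--     rank = {'L': 0, 'U': 2}
--     return [obj for _, obj in
--             sorted(enumerate(lista),
--                    key=lambda p: rank.get(data_paz["type"][p[0]], 1))]
-- ===== Notes on version B (the rewrite author's own statement) =====
-- stated objective: idiomatic
-- what changed: Replaces the three-bucket partition loop (L/N/U lists appended then concatenated) by one stable sort of enumerate(lista) on a category rank ('L'->0, other->1, 'U'->2), which preserves within-group order and yields the same L+N+U concatenation.
import Mathlib
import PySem

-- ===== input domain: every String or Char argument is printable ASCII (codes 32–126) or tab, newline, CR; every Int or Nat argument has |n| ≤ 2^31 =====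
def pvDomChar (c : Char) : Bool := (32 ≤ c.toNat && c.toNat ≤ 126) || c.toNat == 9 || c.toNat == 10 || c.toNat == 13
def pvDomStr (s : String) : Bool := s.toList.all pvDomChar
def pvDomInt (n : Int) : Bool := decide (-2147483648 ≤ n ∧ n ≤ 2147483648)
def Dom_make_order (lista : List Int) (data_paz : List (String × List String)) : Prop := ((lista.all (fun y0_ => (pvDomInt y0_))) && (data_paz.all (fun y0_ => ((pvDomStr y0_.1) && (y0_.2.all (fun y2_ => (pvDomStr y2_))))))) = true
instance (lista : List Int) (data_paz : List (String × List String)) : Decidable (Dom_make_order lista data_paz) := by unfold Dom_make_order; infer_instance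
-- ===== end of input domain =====

-- B replaces A's three-bucket partition loop (append to L/N/U, return L+N+U) with one
-- stable sort of enumerate(lista) on a category rank ('L'->0, other->1, 'U'->2); same value.

-- ===== PORT A =====
-- The label access data_paz["type"][patient] can raise in Python (KeyError / IndexError);
-- the '.getD' fallbacks below are only reached outside Pre_make_order, which excludes exactly those inputs.
def make_order (lista : List Int) (data_paz : List (String × List String)) : List Int :=
  let s := (PySem.List.enumerate lista 0).foldl
    (fun (s : List Int × List Int × List Int) p =>
      if (PySem.List.pyGet? ((PySem.Dict.get? (PySem.Dict.mk data_paz) "type").getD []) p.1).getD "" == "L" then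
        (s.1, s.2.1, s.2.2 ++ [p.2])
      else if (PySem.List.pyGet? ((PySem.Dict.get? (PySem.Dict.mk data_paz) "type").getD []) p.1).getD "" == "U" then
        (s.1 ++ [p.2], s.2.1, s.2.2)
      else (s.1, s.2.1 ++ [p.2], s.2.2))
    ([], [], [])   -- (U, N, L)
  s.2.2 ++ s.2.1 ++ s.1   -- L + N + U

-- ===== PORT B =====
def make_order_alt (lista : List Int) (data_paz : List (String × List String)) : List Int :=
  (PySem.List.sorted (PySem.List.enumerate lista 0)
    (fun p => PySem.Dict.getD (PySem.Dict.mk [("L", (0 : Int)), ("U", 2)])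
      ((PySem.List.pyGet? ((PySem.Dict.get? (PySem.Dict.mk data_paz) "type").getD []) p.1).getD "") 1)
    false).map (·.2)

-- ===== PRECONDITION & SPEC =====
-- Pre_ excludes exactly the inputs on which Python A raises: a nonempty lista with the
-- "type" key missing (KeyError) or its label list shorter than lista (IndexError);
-- B raises identically there (its key lambda performs the same access).
def Pre_make_order (lista : List Int) (data_paz : List (String × List String)) : Prop :=
  lista = [] ∨ ((PySem.Dict.get? (PySem.Dict.mk data_paz) "type").isSome = true ∧
    lista.length ≤ ((PySem.Dict.get? (PySem.Dict.mk data_paz) "type").getD []).length)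
instance (lista : List Int) (data_paz : List (String × List String)) : Decidable (Pre_make_order lista data_paz) := by unfold Pre_make_order; infer_instance

def pvWitness_make_order : List Int × (List (String × List String)) :=
  ([7, 3, 5, 2], [("type", ["U", "L", "N", "L"])])

def Spec_make_order (lista : List Int) (data_paz : List (String × List String)) (out : List Int) : Prop := out = make_order_alt lista data_paz
instance (lista : List Int) (data_paz : List (String × List String)) (out : List Int) : Decidable (Spec_make_order lista data_paz out) := by unfold Spec_make_order; infer_instance

-- ===== CLAIM (what is proved, stated in full; the proofs are below) =====
def Claim_equal_make_order : Prop := ∀ (lista : List Int) (data_paz : List (String × List String)), Dom_make_order lista data_paz → Pre_make_order lista data_paz → Spec_make_order lista data_paz (make_order lista data_paz)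

-- ===== LEMMAS AND PROOFS =====


theorem pvInsertBy_append {α : Type} (before : α → α → Bool) (x : α) (P Q : List α)
    (h1 : ∀ y ∈ P, before x y = false)
    (h2 : ∀ z, Q.head? = some z → before x z = true) :
    PySem.List.insertBy before x (P ++ Q) = P ++ x :: Q := by
  induction P with
  | nil =>
    cases Q with
    | nil => simp [PySem.List.insertBy]
    | cons z zs => simp [PySem.List.insertBy, h2 z rfl]
  | cons y ys ih =>
    have hy : before x y = false := h1 y (by simp)
    have h := ih (fun z hz => h1 z (by simp [hz]))
    simp [PySem.List.insertBy, hy, h]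

theorem pvFoldl_ins {α : Type} (k : α → Int) (hk : ∀ x, k x = 0 ∨ k x = 1 ∨ k x = 2)
    (l A B C : List α)
    (hA : ∀ y ∈ A, k y = 0) (hB : ∀ y ∈ B, k y = 1) (hC : ∀ y ∈ C, k y = 2) :
    l.foldl (fun acc x => PySem.List.insertBy (fun a b => decide (k a < k b)) x acc) (A ++ B ++ C)
      = (A ++ l.filter (fun x => k x == 0)) ++ (B ++ l.filter (fun x => k x == 1))
        ++ (C ++ l.filter (fun x => k x == 2)) := by
  induction l generalizing A B C with
  | nil => simp
  | cons x xs ih =>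
    simp only [List.foldl_cons]
    rcases hk x with h | h | h
    · have hins : PySem.List.insertBy (fun a b => decide (k a < k b)) x (A ++ B ++ C)
          = (A ++ [x]) ++ B ++ C := by
        rw [List.append_assoc, pvInsertBy_append]
        · simp
        · intro y hy; simp [hA y hy, h]
        · intro z hz
          have hz' : z ∈ B ++ C := List.mem_of_mem_head? hz
          rcases List.mem_append.1 hz' with hzB | hzC
          · simp [hB z hzB, h]
          · simp [hC z hzC, h]
      rw [hins, ih (A ++ [x]) B C
        (by intro y hy; rcases List.mem_append.1 hy with hy | hy;
            exacts [hA y hy, by simp at hy; simpa [hy] using h]) hB hC]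
      simp [h]
    · have hins : PySem.List.insertBy (fun a b => decide (k a < k b)) x (A ++ B ++ C)
          = A ++ (B ++ [x]) ++ C := by
        rw [List.append_assoc, List.append_assoc, ← List.append_assoc A B C]
        rw [pvInsertBy_append]
        · simp
        · intro y hy
          rcases List.mem_append.1 hy with hy | hy
          · simp [hA y hy, h]
          · simp [hB y hy, h]
        · intro z hz
          have hz' : z ∈ C := List.mem_of_mem_head? hz
          simp [hC z hz', h]
      rw [hins, ih A (B ++ [x]) C hA
        (by intro y hy; rcases List.mem_append.1 hy with hy | hy;
            exacts [hB y hy, by simp at hy; simpa [hy] using h]) hC]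
      simp [h]
    · have hins : PySem.List.insertBy (fun a b => decide (k a < k b)) x (A ++ B ++ C)
          = A ++ B ++ (C ++ [x]) := by
        rw [PySem.List.insertBy_of_forall_not_before]
        · simp
        · intro y hy
          rcases List.mem_append.1 hy with hy | hy
          · rcases List.mem_append.1 hy with hy | hy
            · simp [hA y hy, h]
            · simp [hB y hy, h]
          · simp [hC y hy, h]
      rw [hins, ih A B (C ++ [x]) hA hB
        (by intro y hy; rcases List.mem_append.1 hy with hy | hy;
            exacts [hC y hy, by simp at hy; simpa [hy] using h])]
      simp [h]



def pvRank (t : String) : Int := if t == "L" then 0 else if t == "U" then 2 else 1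

theorem pvA_fold (t : Int × Int → String) (l : List (Int × Int)) (U N L : List Int) :
    l.foldl (fun (s : List Int × List Int × List Int) p =>
      if t p == "L" then (s.1, s.2.1, s.2.2 ++ [p.2])
      else if t p == "U" then (s.1 ++ [p.2], s.2.1, s.2.2)
      else (s.1, s.2.1 ++ [p.2], s.2.2)) (U, N, L)
    = (U ++ (l.filter (fun p => t p == "U")).map (·.2),
       N ++ (l.filter (fun p => !(t p == "L") && !(t p == "U"))).map (·.2),
       L ++ (l.filter (fun p => t p == "L")).map (·.2)) := by
  induction l generalizing U N L with
  | nil => simp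
  | cons x xs ih =>
    by_cases hL : t x = "L"
    · rw [List.foldl_cons, if_pos (by simp [hL]), ih]; simp [hL]
    · by_cases hU : t x = "U"
      · rw [List.foldl_cons, if_neg (by simp [hL]), if_pos (by simp [hU]), ih]; simp [hU]
      · rw [List.foldl_cons, if_neg (by simp [hL]), if_neg (by simp [hU]), ih]; simp [hL, hU]

theorem pvRank_mem (t : String) : pvRank t = 0 ∨ pvRank t = 1 ∨ pvRank t = 2 := by
  unfold pvRank; split_ifs <;> simp

theorem pvRank0 (t : String) : (pvRank t == 0) = (t == "L") := by
  unfold pvRank; split_ifs <;> simp [*]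
theorem pvRank1 (t : String) : (pvRank t == 1) = (!(t == "L") && !(t == "U")) := by
  unfold pvRank; split_ifs <;> simp [*]
theorem pvRank2 (t : String) : (pvRank t == 2) = (t == "U") := by
  unfold pvRank; split_ifs with h1 h2
  · have h : t = "L" := by simpa using h1
    subst h; decide
  · simp [h2]
  · simp_all


theorem pvSorted_eq_filters {α : Type} (l : List α) (k : α → Int)
    (hk : ∀ x, k x = 0 ∨ k x = 1 ∨ k x = 2) :
    PySem.List.sorted l k false
      = l.filter (fun x => k x == 0) ++ l.filter (fun x => k x == 1)
        ++ l.filter (fun x => k x == 2) := by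
  rw [PySem.List.sorted_eq_foldl_insertBy]
  have h := pvFoldl_ins k hk l [] [] [] (by simp) (by simp) (by simp)
  simpa using h

theorem pvRank_getD (t : String) :
    PySem.Dict.getD (PySem.Dict.mk [("L", (0 : Int)), ("U", 2)]) t 1 = pvRank t := by
  unfold pvRank
  by_cases hL : t = "L"
  · simp [hL, PySem.Dict.getD, PySem.Dict.get?_mk_cons]
  · by_cases hU : t = "U" <;>
      simp [hL, hU, PySem.Dict.getD, PySem.Dict.get?, Ne.symm]

-- ===== VERDICT (by name: the statement is the Claim_ definition above) =====
theorem make_order_spec : Claim_equal_make_order := by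
  intro lista data_paz _ _
  unfold Spec_make_order make_order make_order_alt
  have hkey : (fun p : Int × Int => PySem.Dict.getD (PySem.Dict.mk [("L", (0 : Int)), ("U", 2)])
      ((PySem.List.pyGet? ((PySem.Dict.get? (PySem.Dict.mk data_paz) "type").getD []) p.1).getD "") 1)
      = fun p : Int × Int => pvRank ((PySem.List.pyGet? ((PySem.Dict.get? (PySem.Dict.mk data_paz) "type").getD []) p.1).getD "") :=
    funext fun p => pvRank_getD _
  simp only []
  rw [hkey, pvSorted_eq_filters _ _ (fun x => pvRank_mem _),
    pvA_fold (fun p : Int × Int => (PySem.List.pyGet? ((PySem.Dict.get? (PySem.Dict.mk data_paz) "type").getD []) p.1).getD "")]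
  simp only [List.map_append,
    funext (fun p : Int × Int => pvRank0 ((PySem.List.pyGet? ((PySem.Dict.get? (PySem.Dict.mk data_paz) "type").getD []) p.1).getD "")),
    funext (fun p : Int × Int => pvRank1 ((PySem.List.pyGet? ((PySem.Dict.get? (PySem.Dict.mk data_paz) "type").getD []) p.1).getD "")),
    funext (fun p : Int × Int => pvRank2 ((PySem.List.pyGet? ((PySem.Dict.get? (PySem.Dict.mk data_paz) "type").getD []) p.1).getD ""))]
  simp [List.append_assoc]
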